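-- pv_equiv track=rewrite | github.com/alexander-koch/anlp-project | ngramify.py | ngramify
-- ===== SOURCE A (Python) =====
-- def ngramify(song, buffer_length, word2idx):
--     tokens = song
--     for i in range(0, len(song)):
--         if i+buffer_length+1 >= len(tokens):
--             continue
--
--         xs = tokens[i:i+buffer_length]
--         y = tokens[i+buffer_length]
--         discard = False
--         for x in xs:
--             if x not in word2idx:
--                 discard = True
--                 break
--         if discard or y not in word2idx:
--             continue
--
--         yield xs, y
-- ===== SOURCE B (Python) =====
-- def ngramify(song, buffer_length, word2idx):
--     n = len(song)
--     # prefix counts of unknown tokens: bad[k] = number of tokens among song[:k] not in word2idx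
--     bad = [0]
--     c = 0
--     for w in song:
--         c += w not in word2idx
--         bad.append(c)
--     for i in range(n - buffer_length - 1):
--         j = i + buffer_length
--         if bad[j + 1] == bad[i]:
--             yield song[i:j], song[j]
-- ===== Notes on version B (the rewrite author's own statement) =====
-- stated objective: faster
-- what changed: Replaces the per-window rescan of all context tokens with a precomputed prefix count of unknown tokens, so each window is validated in O(1) by comparing two prefix counts and only valid windows are sliced; the index loop runs only over positions that can yield.
-- outside the precondition, e.g. on ngramify(['', 'a'], -1, {}): A returns [], B returns [([''], 'a'), ([], '')]
import Mathlib
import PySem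

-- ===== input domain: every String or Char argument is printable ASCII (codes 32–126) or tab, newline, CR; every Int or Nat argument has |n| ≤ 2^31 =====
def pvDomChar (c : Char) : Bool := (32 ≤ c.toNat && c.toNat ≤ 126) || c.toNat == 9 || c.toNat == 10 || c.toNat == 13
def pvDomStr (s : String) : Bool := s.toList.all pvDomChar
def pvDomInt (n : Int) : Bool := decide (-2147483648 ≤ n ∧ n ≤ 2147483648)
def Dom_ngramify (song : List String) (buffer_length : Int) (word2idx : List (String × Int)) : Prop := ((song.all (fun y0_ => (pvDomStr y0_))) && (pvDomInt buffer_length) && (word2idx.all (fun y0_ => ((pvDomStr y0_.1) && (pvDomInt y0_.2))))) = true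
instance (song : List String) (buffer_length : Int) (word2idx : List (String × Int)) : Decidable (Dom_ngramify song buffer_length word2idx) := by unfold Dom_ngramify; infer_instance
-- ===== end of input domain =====

-- B replaces A's per-window rescan of the context by a prefix count of unknown tokens
-- (O(1) window validity check; loop only over yieldable positions) — objective: faster.
-- A is a generator; equivalence is about the list of yielded pairs.


-- ===== PORT A =====
-- 'x in word2idx' for a dict: key membership (first-match irrelevant for membership)
def pvKeyIn (word2idx : List (String × Int)) (x : String) : Bool :=
  word2idx.any (fun p => p.1 == x)

def ngramify (song : List String) (buffer_length : Int) (word2idx : List (String × Int)) : List (List String × String) :=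
  let tokens := song
  (PySem.List.pyRange 0 (song.length : Int) 1).foldl (fun acc i =>
    if (tokens.length : Int) ≤ i + buffer_length + 1 then acc
    else
      let xs := PySem.List.slice tokens (some i) (some (i + buffer_length))
      match PySem.List.pyGet? tokens (i + buffer_length) with
      | none => acc  -- Python IndexError; excluded by Pre_
      | some y =>
        let discard := xs.any (fun x => !(pvKeyIn word2idx x))
        if discard || !(pvKeyIn word2idx y) then acc else acc ++ [(xs, y)]) []

-- ===== PORT B =====
def ngramify_alt (song : List String) (buffer_length : Int) (word2idx : List (String × Int)) : List (List String × String) :=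
  let n : Int := song.length
  -- running prefix count of unknown tokens (the 'c += w not in word2idx; bad.append(c)' loop)
  let bad : List Int := song.scanl (fun c w => c + (if !(pvKeyIn word2idx w) then 1 else 0)) 0
  (PySem.List.pyRange 0 (n - buffer_length - 1) 1).foldl (fun acc i =>
    let j := i + buffer_length
    match PySem.List.pyGet? bad (j + 1), PySem.List.pyGet? bad i, PySem.List.pyGet? song j with
    | some bj1, some bi, some y =>
        if bj1 == bi then acc ++ [(PySem.List.slice song (some i) (some j), y)] else acc
    | _, _, _ => acc) []  -- Python IndexError; excluded by Pre_

-- ===== PRECONDITION & SPEC =====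
-- Pre_ restricts to the natural domain of a nonnegative context length: for negative
-- buffer_length A's returned pairs are an artefact of Python's negative slice/index
-- wraparound (and A raises IndexError when buffer_length <= -len(song)); B does the
-- natural prefix-count thing there and may differ.
def Pre_ngramify (song : List String) (buffer_length : Int) (word2idx : List (String × Int)) : Prop :=
  0 ≤ buffer_length
instance (song : List String) (buffer_length : Int) (word2idx : List (String × Int)) : Decidable (Pre_ngramify song buffer_length word2idx) := by unfold Pre_ngramify; infer_instance

def pvWitness_ngramify : List String × Int × (List (String × Int)) :=
  (["a", "b", "c"], 1, [("a", 0), ("b", 1), ("c", 2)])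

def Spec_ngramify (song : List String) (buffer_length : Int) (word2idx : List (String × Int)) (out : List (List String × String)) : Prop := out = ngramify_alt song buffer_length word2idx
instance (song : List String) (buffer_length : Int) (word2idx : List (String × Int)) (out : List (List String × String)) : Decidable (Spec_ngramify song buffer_length word2idx out) := by unfold Spec_ngramify; infer_instance

-- ===== CLAIM (what is proved, stated in full; the proofs are below) =====
def Claim_equal_ngramify : Prop := ∀ (song : List String) (buffer_length : Int) (word2idx : List (String × Int)), Dom_ngramify song buffer_length word2idx → Pre_ngramify song buffer_length word2idx → Spec_ngramify song buffer_length word2idx (ngramify song buffer_length word2idx)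

-- ===== LEMMAS AND PROOFS =====

theorem pvFoldlFixed {α β : Type} (l : List α) (acc : β) :
    l.foldl (fun a _ => a) acc = acc := by
  induction l generalizing acc with
  | nil => rfl
  | cons x xs ih => simpa using ih acc

-- the scanl of a 0/1 prefix-sum loop is the list of prefix counts
theorem pvScanlCount (p : String → Bool) :
    ∀ (song : List String) (c : Int),
      song.scanl (fun c w => c + (if p w then 1 else 0)) c
        = (List.range (song.length + 1)).map (fun k => c + ((song.take k).countP p : Int)) := by
  intro song
  induction song with
  | nil => intro c; simp
  | cons w ws ih =>
    intro c
    rw [List.scanl_cons, ih (c + (if p w then 1 else 0))]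
    conv_rhs => rw [show (w :: ws).length + 1 = (ws.length + 1) + 1 from rfl, List.range_succ_eq_map]
    rw [List.map_cons, List.map_map]
    refine congrArg₂ List.cons (by simp) ?_
    apply List.map_congr_left
    intro k _
    simp only [Function.comp_apply, List.take_succ_cons, List.countP_cons]
    by_cases hp : p w <;> simp [hp] <;> push_cast <;> ring

theorem pvPointwise (song : List String) (bl : Int) (w2i : List (String × Int))
    (hb : 0 ≤ bl) (i : Int) (h0 : 0 ≤ i) (him : i < (song.length : Int) - bl - 1)
    (acc : List (List String × String)) :
    (if (song.length : Int) ≤ i + bl + 1 then acc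
     else
       let xs := PySem.List.slice song (some i) (some (i + bl))
       match PySem.List.pyGet? song (i + bl) with
       | none => acc
       | some y =>
         let discard := xs.any (fun x => !(pvKeyIn w2i x))
         if discard || !(pvKeyIn w2i y) then acc else acc ++ [(xs, y)])
    =
    (let j := i + bl
     match
       PySem.List.pyGet? ((List.range (song.length + 1)).map
         (fun k => 0 + ((song.take k).countP (fun w => !(pvKeyIn w2i w)) : Int))) (j + 1),
       PySem.List.pyGet? ((List.range (song.length + 1)).map
         (fun k => 0 + ((song.take k).countP (fun w => !(pvKeyIn w2i w)) : Int))) i,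
       PySem.List.pyGet? song j with
     | some bj1, some bi, some y =>
         if bj1 == bi then acc ++ [(PySem.List.slice song (some i) (some j), y)] else acc
     | _, _, _ => acc) := by
  dsimp only
  obtain ⟨i', rfl⟩ : ∃ n : Nat, i = (n : Int) := ⟨i.toNat, (Int.toNat_of_nonneg h0).symm⟩
  obtain ⟨b, rfl⟩ : ∃ n : Nat, bl = (n : Int) := ⟨bl.toNat, (Int.toNat_of_nonneg hb).symm⟩
  have hlt : i' + b < song.length := by omega
  rw [if_neg (by omega : ¬ (song.length : Int) ≤ (i' : Int) + (b : Int) + 1)]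
  rw [show (i' : Int) + (b : Int) + 1 = ((i' + b + 1 : Nat) : Int) by push_cast; ring]
  rw [show (i' : Int) + (b : Int) = ((i' + b : Nat) : Int) by push_cast; ring]
  simp only [PySem.List.pyGet?_natCast, PySem.List.slice_natCast]
  rw [List.getElem?_eq_getElem (by omega : i' + b < song.length)]
  rw [List.getElem?_map, List.getElem?_map,
      List.getElem?_range (by omega : i' + b + 1 < song.length + 1),
      List.getElem?_range (by omega : i' < song.length + 1)]
  dsimp only [Option.map_some]
  set p : String → Bool := fun x => !(pvKeyIn w2i x) with hp
  have hsub : i' + b - i' = b := by omega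
  rw [hsub]
  set t : List String := (song.drop i').take b with ht
  set y : String := song[i' + b] with hy
  have hdec : (song.take (i' + b + 1)).countP p
      = (song.take i').countP p + (t.countP p + (if p y then 1 else 0)) := by
    rw [show i' + b + 1 = i' + (b + 1) by omega, List.take_add, List.countP_append]
    congr 1
    rw [List.take_succ, List.countP_append, List.getElem?_drop,
        List.getElem?_eq_getElem (by omega : i' + b < song.length)]
    simp only [List.countP_cons, List.countP_nil, Option.toList_some, Nat.zero_add]
    rw [← ht, ← hy]
  by_cases hcond : (t.any p || p y) = true
  · rw [if_pos hcond]
    have hne : ((song.take (i' + b + 1)).countP p : Int)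
        ≠ ((song.take i').countP p : Int) := by
      rcases Bool.or_eq_true_iff.mp hcond with h | h
      · have : 0 < t.countP p := List.countP_pos_iff.mpr (by
          rcases List.any_eq_true.mp h with ⟨x, hx, hpx⟩; exact ⟨x, hx, hpx⟩)
        rw [hdec]; push_cast; omega
      · rw [hdec, h]; simp; omega
    have hfalse : ((0 + ((song.take (i' + b + 1)).countP p : Int)
        == 0 + ((song.take i').countP p : Int))) = false := by
      simp only [zero_add, beq_eq_false_iff_ne, ne_eq]; exact hne
    rw [hfalse]
    simp
  · rw [if_neg hcond]
    have hor := Bool.or_eq_false_iff.mp (Bool.eq_false_iff.mpr hcond)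
    have ht0 : t.countP p = 0 := by
      rw [List.countP_eq_zero]
      intro a ha
      have := List.any_eq_false.mp hor.1 a ha
      simp [this]
    have heq : (song.take (i' + b + 1)).countP p = (song.take i').countP p := by
      rw [hdec, ht0, hor.2]; simp
    have htrue : ((0 + ((song.take (i' + b + 1)).countP p : Int)
        == 0 + ((song.take i').countP p : Int))) = true := by
      simp [heq]
    rw [htrue]
    simp

theorem ngramify_spec : Claim_equal_ngramify := by
  intro song bl w2i _ hpre
  have hb : 0 ≤ bl := hpre
  unfold Spec_ngramify ngramify ngramify_alt
  dsimp only
  rw [pvScanlCount (fun w => !(pvKeyIn w2i w)) song 0]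
  by_cases hc : (song.length : Int) - bl - 1 ≤ 0
  · rw [PySem.List.pyRange_one_eq_nil hc, List.foldl_nil]
    refine (PySem.List.foldl_congr_mem _ _ (fun acc _ => acc) _ ?_).trans (pvFoldlFixed _ _)
    intro acc i hi
    have h0 : 0 ≤ i := ((PySem.List.mem_pyRange_one).1 hi).1
    exact if_pos (by omega)
  · rw [not_le] at hc
    rw [PySem.List.pyRange_one_append 0 ((song.length : Int) - bl - 1) (song.length : Int)
        (by omega) (by omega), List.foldl_append]
    refine (PySem.List.foldl_congr_mem _ _ (fun acc _ => acc) _ ?_).trans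
      ((pvFoldlFixed _ _).trans ?_)
    · intro acc i hi
      have h0 : ((song.length : Int) - bl - 1) ≤ i := ((PySem.List.mem_pyRange_one).1 hi).1
      exact if_pos (by omega)
    apply PySem.List.foldl_congr_mem
    intro acc i hi
    have h0 : 0 ≤ i := ((PySem.List.mem_pyRange_one).1 hi).1
    have him : i < (song.length : Int) - bl - 1 := ((PySem.List.mem_pyRange_one).1 hi).2
    exact pvPointwise song bl w2i hb i h0 him acc
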